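-- pv_equiv track=rewrite | github.com/JenspederM/codewars | CompletePhotoPattern.py | arrange_by_height
-- ===== SOURCE A (Python) =====
-- from typing import List
--
-- def arrange_by_height(legs: List[int]):
--     legs.sort(reverse=True)
--     ret = []
--
--     for i in range(len(legs)):
--         if i % 2 == 0:
--             ret.append(legs[i])
--         else:
--             ret.insert(0, legs[i])
--
--     return ret
-- ===== SOURCE B (Python) =====
-- from typing import List
--
-- def arrange_by_height(legs: List[int]):
--     legs.sort(reverse=True)
--     n = len(legs)
--     ret = [0] * n
--     l = n // 2 - 1   # next free slot on the left half (filled outward)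
--     r = n // 2       # next free slot on the right half (filled outward)
--     for i, v in enumerate(legs):
--         if i % 2 == 0:
--             ret[r] = v
--             r += 1
--         else:
--             ret[l] = v
--             l -= 1
--     return ret
-- ===== Notes on version B (the rewrite author's own statement) =====
-- stated objective: faster
-- what changed: Replaces A's loop that builds the result with repeated O(n) ret.insert(0, ...) calls by a preallocated output array filled outward from the middle with two index pointers, one write per element.
import Mathlib
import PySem

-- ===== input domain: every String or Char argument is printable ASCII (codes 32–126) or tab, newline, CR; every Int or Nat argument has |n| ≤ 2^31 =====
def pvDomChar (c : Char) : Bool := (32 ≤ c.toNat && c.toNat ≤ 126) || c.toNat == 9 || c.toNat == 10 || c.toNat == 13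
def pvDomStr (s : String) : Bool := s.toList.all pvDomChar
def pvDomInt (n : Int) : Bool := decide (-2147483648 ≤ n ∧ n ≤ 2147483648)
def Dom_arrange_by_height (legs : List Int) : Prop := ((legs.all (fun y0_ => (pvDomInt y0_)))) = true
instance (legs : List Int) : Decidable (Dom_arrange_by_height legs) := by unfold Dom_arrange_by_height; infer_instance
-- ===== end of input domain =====

-- B replaces A's quadratic insert(0) loop by a preallocated array filled outward from the
-- middle with two pointers (O(n) after the sort). Both A and B sort the argument list
-- descending in place (the equivalence proved here is about the return value; B performs
-- the same mutation).

-- ===== PORT A =====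
def arrange_by_height (legs : List Int) : List Int :=
  let s := PySem.List.sorted legs (fun x => x) true
  (PySem.List.pyRange 0 (s.length : Int) 1).foldl
    (fun ret i =>
      if PySem.Int.mod i 2 == 0 then ret ++ [PySem.List.pyGetD s i 0]
      else PySem.List.pyGetD s i 0 :: ret) []

-- ===== PORT B =====
def arrange_by_height_alt (legs : List Int) : List Int :=
  let s := PySem.List.sorted legs (fun x => x) true
  let n : Int := (s.length : Int)
  ((PySem.List.enumerate s 0).foldl
    (fun (acc : List Int × Int × Int) p =>
      if PySem.Int.mod p.1 2 == 0 then
        (PySem.List.pySetD acc.1 acc.2.2 p.2, acc.2.1, acc.2.2 + 1)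
      else
        (PySem.List.pySetD acc.1 acc.2.1 p.2, acc.2.1 - 1, acc.2.2))
    (List.replicate n.toNat 0, PySem.Int.floordiv n 2 - 1, PySem.Int.floordiv n 2)).1

-- ===== PRECONDITION & SPEC =====
def Spec_arrange_by_height (legs : List Int) (out : List Int) : Prop := out = arrange_by_height_alt legs
instance (legs : List Int) (out : List Int) : Decidable (Spec_arrange_by_height legs out) := by unfold Spec_arrange_by_height; infer_instance

-- ===== CLAIM (what is proved, stated in full; the proofs are below) =====
def Claim_equal_arrange_by_height : Prop := ∀ (legs : List Int), Dom_arrange_by_height legs → Spec_arrange_by_height legs (arrange_by_height legs)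

-- ===== LEMMAS AND PROOFS =====

-- elements of a list at even (b = true) resp. odd (b = false) offsets
def ev : Bool → List Int → List Int
  | _, [] => []
  | true, x :: t => x :: ev false t
  | false, _ :: t => ev true t

theorem ev_len : ∀ (xs : List Int),
    (ev true xs).length + (ev false xs).length = xs.length ∧
    (ev false xs).length ≤ (ev true xs).length ∧
    (ev true xs).length ≤ (ev false xs).length + 1 := by
  intro xs
  induction xs with
  | nil => simp [ev]
  | cons x t ih => simp only [ev, List.length_cons]; omega

theorem set_len_append {α : Type} : ∀ (p : List α) (z0 : α) (r : List α) (v : α),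
    (p ++ z0 :: r).set p.length v = p ++ v :: r := by
  intro p
  induction p with
  | nil => intro z0 r v; simp
  | cons a p ih => intro z0 r v; simp [ih]

theorem lemA : ∀ (xs : List Int) (k : Int) (ret : List Int), 0 ≤ k →
    (PySem.List.enumerate xs k).foldl
      (fun ret p => if PySem.Int.mod p.1 2 == 0 then ret ++ [p.2] else p.2 :: ret) ret
    = if k % 2 = 0 then (ev false xs).reverse ++ ret ++ ev true xs
      else (ev true xs).reverse ++ ret ++ ev false xs := by
  intro xs
  induction xs with
  | nil => intro k ret hk; simp [PySem.List.enumerate_nil, ev]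
  | cons x t ih =>
    intro k ret hk
    have hm : PySem.Int.mod k 2 = k % 2 := PySem.Int.mod_eq_emod_of_pos (by omega)
    rw [PySem.List.enumerate_cons, List.foldl_cons]
    rcases Int.emod_two_eq k with h | h
    · have h1 : (k + 1) % 2 = 1 := by omega
      simp only [hm, h]
      rw [ih (k + 1) _ (by omega), h1]
      simp [ev]
    · have h1 : (k + 1) % 2 = 0 := by omega
      simp only [hm, h]
      rw [ih (k + 1) _ (by omega), h1]
      simp [ev]

theorem lemB : ∀ (xs : List Int) (k : Int) (za m zb : List Int), 0 ≤ k →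
    za.length = (if k % 2 = 0 then ev false xs else ev true xs).length →
    zb.length = (if k % 2 = 0 then ev true xs else ev false xs).length →
    ((PySem.List.enumerate xs k).foldl
      (fun (acc : List Int × Int × Int) p =>
        if PySem.Int.mod p.1 2 == 0 then
          (PySem.List.pySetD acc.1 acc.2.2 p.2, acc.2.1, acc.2.2 + 1)
        else
          (PySem.List.pySetD acc.1 acc.2.1 p.2, acc.2.1 - 1, acc.2.2))
      (za ++ m ++ zb, (za.length : Int) - 1, (za.length : Int) + m.length)).1
    = if k % 2 = 0 then (ev false xs).reverse ++ m ++ ev true xs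
      else (ev true xs).reverse ++ m ++ ev false xs := by
  intro xs
  induction xs with
  | nil =>
    intro k za m zb hk hza hzb
    simp only [ev, ite_self, List.length_nil] at hza hzb
    obtain rfl := List.eq_nil_of_length_eq_zero hza
    obtain rfl := List.eq_nil_of_length_eq_zero hzb
    simp [PySem.List.enumerate_nil, ev]
  | cons x t ih =>
    intro k za m zb hk hza hzb
    have hm : PySem.Int.mod k 2 = k % 2 := PySem.Int.mod_eq_emod_of_pos (by omega)
    rw [PySem.List.enumerate_cons, List.foldl_cons]
    rcases Int.emod_two_eq k with h | h
    · -- even step: write at the right pointer, consuming the head of zb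
      have h1 : (k + 1) % 2 = 1 := by omega
      simp only [h] at hza hzb
      obtain ⟨z0, zb', rfl⟩ : ∃ z0 zb', zb = z0 :: zb' := by
        cases zb with
        | nil => simp [ev] at hzb
        | cons a b => exact ⟨a, b, rfl⟩
      have hcond : (PySem.Int.mod k 2 == 0) = true := by rw [hm, h]; rfl
      have hset : PySem.List.pySetD (za ++ m ++ z0 :: zb') ((za.length : Int) + m.length) x
          = za ++ (m ++ [x]) ++ zb' := by
        rw [PySem.List.pySetD_of_nonneg _ _ (by omega)]
        have h2 : ((za.length : Int) + m.length).toNat = (za ++ m).length := by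
          simp; omega
        rw [h2, ← List.append_assoc, set_len_append]
        simp
      have hza' : za.length = (ev true t).length := by
        simpa [ev] using hza
      have hzb' : zb'.length = (ev false t).length := by
        simp [ev] at hzb; omega
      have hstep := ih (k + 1) za (m ++ [x]) zb' (by omega)
        (by rw [h1]; simpa using hza') (by rw [h1]; simpa using hzb')
      rw [if_neg (by omega)] at hstep
      simp only [hcond, if_true, hset]
      have e3 : (za.length : Int) + m.length + 1 = (za.length : Int) + (m ++ [x]).length := by
        simp; omega
      rw [e3, hstep]
      simp [ev, h]
    · -- odd step: write at the left pointer, consuming the last element of za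
      have h1 : (k + 1) % 2 = 0 := by omega
      simp only [h] at hza hzb
      rcases za.eq_nil_or_concat with rfl | ⟨p, u, rfl⟩
      · simp [ev] at hza
      simp only [List.concat_eq_append] at hza ⊢
      have hcond : (PySem.Int.mod k 2 == 0) = false := by rw [hm, h]; rfl
      have hset : PySem.List.pySetD ((p ++ [u]) ++ m ++ zb) (((p ++ [u]).length : Int) - 1) x
          = p ++ (x :: m) ++ zb := by
        rw [PySem.List.pySetD_of_nonneg _ _ (by simp)]
        have h2 : ((((p ++ [u]).length : Int)) - 1).toNat = p.length := by
          simp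
        rw [h2]
        have h3 : (p ++ [u]) ++ m ++ zb = p ++ u :: (m ++ zb) := by simp
        rw [h3, set_len_append]
        simp
      have hza' : p.length = (ev false t).length := by
        simp [ev] at hza; omega
      have hzb' : zb.length = (ev true t).length := by
        simpa [ev] using hzb
      have hstep := ih (k + 1) p (x :: m) zb (by omega)
        (by rw [h1]; simpa using hza') (by rw [h1]; simpa using hzb')
      rw [if_pos (show (k + 1) % 2 = 0 by omega)] at hstep
      simp only [hcond, Bool.false_eq_true, if_false, hset]
      have e2 : ((p ++ [u]).length : Int) - 1 - 1 = (p.length : Int) - 1 := by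
        simp only [List.length_append, List.length_cons, List.length_nil]; omega
      have e3 : ((p ++ [u]).length : Int) + m.length = (p.length : Int) + (x :: m).length := by
        simp only [List.length_append, List.length_cons, List.length_nil]; omega
      rw [e2, e3, hstep]
      simp [ev, h]

-- ===== VERDICT (by name: the statement is the Claim_ definition above) =====
theorem arrange_by_height_spec : Claim_equal_arrange_by_height := by
  intro legs _
  show arrange_by_height legs = arrange_by_height_alt legs
  unfold arrange_by_height arrange_by_height_alt
  simp only []
  generalize PySem.List.sorted legs (fun x => x) true = s
  obtain ⟨hsum, hle1, hle2⟩ := ev_len s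
  -- A-side: the range-with-indexing fold is the fold over enumerate s
  have hmap : (PySem.List.pyRange 0 (s.length : Int) 1).foldl
      (fun ret i => if PySem.Int.mod i 2 == 0 then ret ++ [PySem.List.pyGetD s i 0]
        else PySem.List.pyGetD s i 0 :: ret) []
      = (PySem.List.enumerate s 0).foldl
        (fun ret p => if PySem.Int.mod p.1 2 == 0 then ret ++ [p.2] else p.2 :: ret) [] := by
    rw [PySem.List.enumerate_eq_map_pyRange s 0, List.foldl_map]
    simp [PySem.List.len_eq]
  have hA := lemA s 0 [] (by omega)
  rw [if_pos (by decide)] at hA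
  -- B-side: the two-pointer fill
  have hfd : PySem.Int.floordiv ((s.length : Int)) 2 = ((ev false s).length : Int) := by
    rw [PySem.Int.floordiv_eq_ediv_of_pos (by omega)]
    omega
  have hrep : (((s.length : Int)).toNat) = (ev false s).length + (ev true s).length := by omega
  have hB := lemB s 0 (List.replicate (ev false s).length (0 : Int)) []
      (List.replicate (ev true s).length (0 : Int)) (by omega)
      (by simp) (by simp)
  rw [if_pos (by decide)] at hB
  simp only [List.append_nil, List.length_replicate, List.length_nil] at hB
  rw [hmap, hA, hfd, hrep, List.replicate_add]
  simpa using hB.symm
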